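-- pv_equiv track=rewrite | github.com/pypi-data/pypi-mirror-144 | packages/guesstheword/guesstheword-0.0.2-py3-none-any.whl/wordlehelper/__init__.py | check_for_not_included
-- ===== SOURCE A (Python) =====
-- def check_for_not_included(not_included, word, characters_to_include):
--     response = True
--     if not_included != None:
--         for letter in not_included:
--             if letter in word:
--                 response = False
--
--         if response:
--             for letter in characters_to_include :
--                 if letter not in word:
--                     response = False
--
--     return response
-- ===== SOURCE B (Python) =====
-- def check_for_not_included(not_included, word, characters_to_include):
--     if not_included is None:
--         return True
--     # Unify both checks into a single tagged requirements list and count violations: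
--     # each letter carries the membership verdict we want ('in word' must equal want).
--     requirements = [(letter, True) for letter in characters_to_include]
--     requirements += [(letter, False) for letter in not_included]
--     violations = sum(1 for letter, want in requirements if (letter in word) != want)
--     return violations == 0
-- ===== Notes on version B (the rewrite author's own statement) =====
-- stated objective: alternative
-- what changed: Instead of A's mutable flag and two staged loops gated on each other, B builds one unified tagged requirements list [(letter, wanted-membership)] and counts the requirements the word violates, returning whether that count is zero.
import Mathlib
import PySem

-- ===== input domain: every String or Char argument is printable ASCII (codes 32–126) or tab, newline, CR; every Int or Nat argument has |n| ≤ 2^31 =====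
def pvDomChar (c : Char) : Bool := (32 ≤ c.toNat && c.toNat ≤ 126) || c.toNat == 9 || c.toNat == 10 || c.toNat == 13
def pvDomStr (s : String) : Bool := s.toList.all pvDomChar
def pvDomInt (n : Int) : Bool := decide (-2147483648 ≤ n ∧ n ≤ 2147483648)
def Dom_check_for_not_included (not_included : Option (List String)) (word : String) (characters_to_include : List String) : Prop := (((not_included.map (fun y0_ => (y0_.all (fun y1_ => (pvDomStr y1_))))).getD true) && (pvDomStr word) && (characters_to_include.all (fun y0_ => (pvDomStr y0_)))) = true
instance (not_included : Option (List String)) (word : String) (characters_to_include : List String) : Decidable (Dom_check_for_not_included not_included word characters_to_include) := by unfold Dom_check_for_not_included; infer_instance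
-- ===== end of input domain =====

-- B replaces A's mutable flag and two staged loops with one unified tagged
-- requirements list [(letter, wanted-membership)] and a count of violated
-- requirements (alternative decomposition; same cost, same result).

-- ===== PORT A =====
-- literal transliteration: flag `response`, two full foldl loops, second gated on the flag
def check_for_not_included (not_included : Option (List String)) (word : String) (characters_to_include : List String) : Bool :=
  let response := true
  match not_included with
  | none => response
  | some ni =>
    let response := ni.foldl (fun r letter => if PySem.Str.isIn letter word then false else r) response
    let response :=
      if response then
        characters_to_include.foldl (fun r letter => if !(PySem.Str.isIn letter word) then false else r) response
      else response
    response

-- ===== PORT B =====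
def check_for_not_included_alt (not_included : Option (List String)) (word : String) (characters_to_include : List String) : Bool :=
  match not_included with
  | none => true
  | some ni =>
    let requirements := characters_to_include.map (fun letter => (letter, true))
                        ++ ni.map (fun letter => (letter, false))
    let violations : Int :=
      requirements.foldl (fun acc lw => if (PySem.Str.isIn lw.1 word != lw.2) = true then acc + 1 else acc) 0
    violations == 0

-- ===== PRECONDITION & SPEC =====
def Spec_check_for_not_included (not_included : Option (List String)) (word : String) (characters_to_include : List String) (out : Bool) : Prop := out = check_for_not_included_alt not_included word characters_to_include
instance (not_included : Option (List String)) (word : String) (characters_to_include : List String) (out : Bool) : Decidable (Spec_check_for_not_included not_included word characters_to_include out) := by unfold Spec_check_for_not_included; infer_instance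

-- ===== CLAIM (what is proved, stated in full; the proofs are below) =====
def Claim_equal_check_for_not_included : Prop := ∀ (not_included : Option (List String)) (word : String) (characters_to_include : List String), Dom_check_for_not_included not_included word characters_to_include → Spec_check_for_not_included not_included word characters_to_include (check_for_not_included not_included word characters_to_include)

-- ===== LEMMAS AND PROOFS =====

-- A's flag loop `if p x then response = False` equals `b && all (!p)`.
theorem flagFold_eq_all {α : Type} (p : α → Bool) (xs : List α) (b : Bool) :
    xs.foldl (fun r x => if p x then false else r) b = (b && xs.all (fun x => !p x)) := by
  induction xs generalizing b with
  | nil => simp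
  | cons x xs ih =>
    simp only [List.foldl_cons, List.all_cons, ih]
    cases p x <;> simp

-- B's counting fold equals the initial value plus the countP of violations.
theorem countFold_eq_countP {α : Type} (p : α → Bool) (xs : List α) (n : Int) :
    xs.foldl (fun acc x => if p x then acc + 1 else acc) n = n + (xs.countP p : Nat) := by
  induction xs generalizing n with
  | nil => simp
  | cons x xs ih =>
    simp only [List.foldl_cons, List.countP_cons, ih]
    cases h : p x <;> simp <;> omega

-- a sum of two casts is zero iff both counts are zero (as Bool equalities)
theorem int_sum_beq_zero (m n : Nat) :
    ((((m : Int) + (n : Nat)) : Int) == 0) = (decide (m = 0) && decide (n = 0)) := by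
  apply Bool.eq_iff_iff.mpr
  simp only [beq_iff_eq, Bool.and_eq_true, decide_eq_true_eq]
  omega

-- a list is violation-free iff every element passes
theorem countP_zero_iff_all {α : Type} (p : α → Bool) (xs : List α) :
    decide (xs.countP p = 0) = xs.all (fun x => !p x) := by
  apply Bool.eq_iff_iff.mpr
  simp only [decide_eq_true_eq, List.countP_eq_zero, List.all_eq_true]
  constructor <;> intro h a ha <;> have := h a ha <;> simp_all

-- ===== VERDICT (by name: the statement is the Claim_ definition above) =====
theorem check_for_not_included_spec : Claim_equal_check_for_not_included := by
  intro ni word cti _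
  unfold Spec_check_for_not_included check_for_not_included check_for_not_included_alt
  cases ni with
  | none => rfl
  | some l =>
    simp only [flagFold_eq_all, Bool.true_and, countFold_eq_countP, Int.zero_add,
      List.countP_append]
    rw [Nat.cast_add, int_sum_beq_zero, List.countP_map, List.countP_map,
      countP_zero_iff_all, countP_zero_iff_all]
    simp only [Function.comp_def, Bool.bne_false, Bool.bne_true, Bool.not_not]
    cases hl : l.all (fun a => !PySem.Str.isIn a word) <;> simp
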